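-- pv_equiv track=rewrite | github.com/tainadrumond/impatech | programacao1/lista3/exercicio3.py | get_vogals
-- ===== SOURCE A (Python) =====
-- def get_vogals(text: str):
--     VOGALS = ['a', 'e', 'i', 'o', 'u']
--     vogals_in_text = []
--     for vogal in VOGALS:
--         if vogal in text:
--             vogals_in_text.append(vogal)
--             continue
--     return vogals_in_text
-- ===== SOURCE B (Python) =====
-- def get_vogals(text: str):
--     # Single pass over text with five boolean flags and an early exit once
--     # all vowels have been seen; then emit the flags in a,e,i,o,u order.
--     a = e = i = o = u = False
--     for c in text:
--         if c == 'a':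
--             a = True
--         elif c == 'e':
--             e = True
--         elif c == 'i':
--             i = True
--         elif c == 'o':
--             o = True
--         elif c == 'u':
--             u = True
--         if a and e and i and o and u:
--             break
--     res = []
--     if a:
--         res.append('a')
--     if e:
--         res.append('e')
--     if i:
--         res.append('i')
--     if o:
--         res.append('o')
--     if u:
--         res.append('u')
--     return res
-- ===== Notes on version B (the rewrite author's own statement) =====
-- stated objective: alternative
-- what changed: Replaces the five substring scans of text (one per vowel) with a single character-by-character pass maintaining five boolean flags with an early break once all vowels are seen, followed by a flag-decoding step that emits the vowels in fixed order.
import Mathlib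
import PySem

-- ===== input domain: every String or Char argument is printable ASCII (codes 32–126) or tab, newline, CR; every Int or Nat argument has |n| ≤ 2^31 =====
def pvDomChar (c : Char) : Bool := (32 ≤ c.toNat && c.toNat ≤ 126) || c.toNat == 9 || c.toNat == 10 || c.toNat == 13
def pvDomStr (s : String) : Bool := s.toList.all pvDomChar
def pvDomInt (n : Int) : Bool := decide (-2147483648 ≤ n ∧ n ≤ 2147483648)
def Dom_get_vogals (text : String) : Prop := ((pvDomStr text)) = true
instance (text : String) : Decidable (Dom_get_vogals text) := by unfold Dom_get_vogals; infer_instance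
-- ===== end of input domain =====

-- B replaces the five per-vowel substring scans of A with a single pass over the
-- characters of text maintaining five boolean flags (early exit once all are set),
-- then decodes the flags in fixed order (alternative decomposition, same cost class).


-- ===== PORT A =====
-- 'vogal in text' with a one-character vogal is exactly a character-membership test: text.toList.contains v
def get_vogals (text : String) : List String :=
  let VOGALS : List Char := ['a', 'e', 'i', 'o', 'u']
  VOGALS.foldl (fun acc vogal =>
    if text.toList.contains vogal then acc ++ [String.ofList [vogal]] else acc) []

-- ===== PORT B =====
-- the single-pass flag loop of Source B: update one flag per character (elif chain), break when all five are set
def pvFlagLoop : List Char → Bool → Bool → Bool → Bool → Bool → Bool × Bool × Bool × Bool × Bool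
  | [], a, e, i, o, u => (a, e, i, o, u)
  | c :: cs, a, e, i, o, u =>
    let s : Bool × Bool × Bool × Bool × Bool :=
      if c = 'a' then (true, e, i, o, u)
      else if c = 'e' then (a, true, i, o, u)
      else if c = 'i' then (a, e, true, o, u)
      else if c = 'o' then (a, e, i, true, u)
      else if c = 'u' then (a, e, i, o, true)
      else (a, e, i, o, u)
    if s.1 && s.2.1 && s.2.2.1 && s.2.2.2.1 && s.2.2.2.2 then s
    else pvFlagLoop cs s.1 s.2.1 s.2.2.1 s.2.2.2.1 s.2.2.2.2

def get_vogals_alt (text : String) : List String :=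
  let s := pvFlagLoop text.toList false false false false false
  (if s.1 then ["a"] else []) ++ (if s.2.1 then ["e"] else []) ++
  (if s.2.2.1 then ["i"] else []) ++ (if s.2.2.2.1 then ["o"] else []) ++
  (if s.2.2.2.2 then ["u"] else [])

-- ===== PRECONDITION & SPEC =====
def Spec_get_vogals (text : String) (out : List String) : Prop := out = get_vogals_alt text
instance (text : String) (out : List String) : Decidable (Spec_get_vogals text out) := by unfold Spec_get_vogals; infer_instance

-- ===== CLAIM (what is proved, stated in full; the proofs are below) =====
def Claim_equal_get_vogals : Prop := ∀ (text : String), Dom_get_vogals text → Spec_get_vogals text (get_vogals text)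

-- ===== LEMMAS AND PROOFS =====
theorem pvFlagLoop_eq (cs : List Char) : ∀ (a e i o u : Bool),
    pvFlagLoop cs a e i o u =
      (a || decide ('a' ∈ cs), e || decide ('e' ∈ cs), i || decide ('i' ∈ cs),
       o || decide ('o' ∈ cs), u || decide ('u' ∈ cs)) := by
  induction cs with
  | nil => intro a e i o u; simp [pvFlagLoop]
  | cons c cs ih =>
    intro a e i o u
    by_cases ha : c = 'a'
    · subst ha
      cases a <;> cases e <;> cases i <;> cases o <;> cases u <;>
        simp [pvFlagLoop, ih, List.mem_cons]
    · by_cases he : c = 'e'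
      · subst he
        cases a <;> cases e <;> cases i <;> cases o <;> cases u <;>
          simp [pvFlagLoop, ih, List.mem_cons]
      · by_cases hi : c = 'i'
        · subst hi
          cases a <;> cases e <;> cases i <;> cases o <;> cases u <;>
            simp [pvFlagLoop, ih, List.mem_cons]
        · by_cases ho : c = 'o'
          · subst ho
            cases a <;> cases e <;> cases i <;> cases o <;> cases u <;>
              simp [pvFlagLoop, ih, List.mem_cons]
          · by_cases hu : c = 'u'
            · subst hu
              cases a <;> cases e <;> cases i <;> cases o <;> cases u <;>
                simp [pvFlagLoop, ih, List.mem_cons]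
            · have ha' : 'a' ≠ c := Ne.symm ha
              have he' : 'e' ≠ c := Ne.symm he
              have hi' : 'i' ≠ c := Ne.symm hi
              have ho' : 'o' ≠ c := Ne.symm ho
              have hu' : 'u' ≠ c := Ne.symm hu
              cases a <;> cases e <;> cases i <;> cases o <;> cases u <;>
                simp [pvFlagLoop, ih, List.mem_cons, ha, he, hi, ho, hu, ha', he', hi', ho', hu']

-- ===== VERDICT (by name: the statement is the Claim_ definition above) =====
theorem get_vogals_spec : Claim_equal_get_vogals := by
  intro text _
  unfold Spec_get_vogals get_vogals get_vogals_alt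
  simp only [List.foldl, pvFlagLoop_eq, Bool.false_or]
  by_cases ha : 'a' ∈ text.toList <;> by_cases he : 'e' ∈ text.toList <;>
    by_cases hi : 'i' ∈ text.toList <;> by_cases ho : 'o' ∈ text.toList <;>
    by_cases hu : 'u' ∈ text.toList <;> simp [ha, he, hi, ho, hu]
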